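-- pv_equiv track=rewrite | github.com/joaoragazzo/no-admin-abuse | server-scrapping/Classifier/ia.py | validate_entities
-- ===== SOURCE A (Python) =====
-- from typing import List, Dict, Tuple, Optional
--
-- def validate_entities(text: str, entities: List[Tuple[int, int, str]]) -> bool:
--     """Valida se as entidades não se sobrepõem e estão alinhadas corretamente"""
--     if not entities:
--         return True
--
--     # Verifica alinhamento
--     for start, end, label in entities:
--         if start < 0 or end > len(text) or start >= end:
--             return False
--         # Verifica se a substring faz sentido
--         substring = text[start:end]
--         if not substring.strip():
--             return False
--
--     # Verifica sobreposições
--     entities_sorted = sorted(entities, key=lambda x: x[0])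
--     for i in range(len(entities_sorted) - 1):
--         current_end = entities_sorted[i][1]
--         next_start = entities_sorted[i + 1][0]
--         if current_end > next_start:
--             return False
--
--     return True
-- ===== SOURCE B (Python) =====
-- def validate_entities(text, entities):
--     """Single pass: track occupied character positions in a set; an entity is
--     rejected if misaligned, whitespace-only, or if its span hits an occupied position."""
--     occupied = set()
--     for start, end, label in entities:
--         if start < 0 or end > len(text) or start >= end:
--             return False
--         if not text[start:end].strip():
--             return False
--         span = set(range(start, end))
--         if occupied & span:
--             return False
--         occupied |= span
--     return True
-- ===== Notes on version B (the rewrite author's own statement) =====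
-- stated objective: alternative
-- what changed: Replaces A's validity pass plus sort-by-start plus adjacent-pair overlap scan with one pass that maintains a set of occupied character positions and rejects an entity whose half-open span intersects it.
import Mathlib
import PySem

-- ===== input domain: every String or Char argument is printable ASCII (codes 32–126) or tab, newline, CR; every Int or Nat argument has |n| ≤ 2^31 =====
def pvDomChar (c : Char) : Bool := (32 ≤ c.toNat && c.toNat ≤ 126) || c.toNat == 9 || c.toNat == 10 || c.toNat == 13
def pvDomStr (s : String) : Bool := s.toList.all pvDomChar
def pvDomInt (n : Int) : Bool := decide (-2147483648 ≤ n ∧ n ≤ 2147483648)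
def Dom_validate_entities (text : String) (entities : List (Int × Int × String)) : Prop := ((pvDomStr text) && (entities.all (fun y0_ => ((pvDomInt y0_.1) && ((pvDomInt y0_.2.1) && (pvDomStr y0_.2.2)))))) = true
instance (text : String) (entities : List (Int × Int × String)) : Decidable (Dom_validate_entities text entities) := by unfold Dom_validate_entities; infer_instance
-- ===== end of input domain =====

-- B is an alternative single-pass algorithm: an occupied-positions set replaces A's sort + adjacent-pair overlap scan.

-- ===== PORT A =====
-- alignment check of one entity ('if start < 0 or end > len(text) or start >= end' and the strip test)
def vaCheck (tl : List Char) (ent : Int × Int × String) : Bool :=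
  if ent.1 < 0 || ent.2.1 > (tl.length : Int) || ent.1 ≥ ent.2.1 then false
  else if PySem.Chars.strip (PySem.List.slice tl (some ent.1) (some ent.2.1)) = [] then false
  else true

-- body of the 'for i in range(len(entities_sorted) - 1)' overlap loop
def vaAdj (es : List (Int × Int × String)) (i : Int) : Bool :=
  let current_end := (PySem.List.pyGetD es i (0, 0, "")).2.1
  let next_start := (PySem.List.pyGetD es (i + 1) (0, 0, "")).1
  !(current_end > next_start)

def validate_entities (text : String) (entities : List (Int × Int × String)) : Bool :=
  if entities = [] then true
  else if !(entities.all (vaCheck text.toList)) then false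
  else
    let entities_sorted := PySem.List.sorted entities (fun x => x.1) false
    if !((PySem.List.pyRange 0 ((entities_sorted.length : Int) - 1) 1).all (vaAdj entities_sorted)) then false
    else true

-- ===== PORT B =====
-- the single pass of Source B: same per-entity checks, then the occupied-set collision test
def vbLoop (tl : List Char) (occupied : PySem.Set Int) : List (Int × Int × String) → Bool
  | [] => true
  | ent :: rest =>
    if ent.1 < 0 || ent.2.1 > (tl.length : Int) || ent.1 ≥ ent.2.1 then false
    else if PySem.Chars.strip (PySem.List.slice tl (some ent.1) (some ent.2.1)) = [] then false
    else
      let span : PySem.Set Int := PySem.Set.ofList (PySem.List.pyRange ent.1 ent.2.1 1)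
      if PySem.Set.inter occupied span ≠ [] then false
      else vbLoop tl (PySem.Set.union occupied span) rest

def validate_entities_alt (text : String) (entities : List (Int × Int × String)) : Bool :=
  vbLoop text.toList PySem.Set.empty entities

-- ===== PRECONDITION & SPEC =====
def Spec_validate_entities (text : String) (entities : List (Int × Int × String)) (out : Bool) : Prop := out = validate_entities_alt text entities
instance (text : String) (entities : List (Int × Int × String)) (out : Bool) : Decidable (Spec_validate_entities text entities out) := by unfold Spec_validate_entities; infer_instance

-- ===== CLAIM (what is proved, stated in full; the proofs are below) =====
def Claim_equal_validate_entities : Prop := ∀ (text : String) (entities : List (Int × Int × String)), Dom_validate_entities text entities → Spec_validate_entities text entities (validate_entities text entities)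

-- ===== LEMMAS AND PROOFS =====

-- half-open intervals of two entities are disjoint
def Disj (a b : Int × Int × String) : Prop := a.2.1 ≤ b.1 ∨ b.2.1 ≤ a.1

lemma disj_symm : ∀ {a b : Int × Int × String}, Disj a b → Disj b a := by
  intro a b h; unfold Disj at *; omega

-- two nonempty half-open intervals intersect iff they are not disjoint
lemma interval_disj {s e s' e' : Int} (h1 : s < e) (h2 : s' < e') :
    (∀ x : Int, ¬(s ≤ x ∧ x < e ∧ s' ≤ x ∧ x < e')) ↔ (e ≤ s' ∨ e' ≤ s) := by
  constructor
  · intro h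
    by_contra hc
    push Not at hc
    exact h (max s s') (by omega)
  · intro h x; omega

-- if some entity fails the alignment check, B's loop returns false (whatever 'occupied' is)
lemma vbLoop_false_of_bad (tl : List Char) :
    ∀ (rest : List (Int × Int × String)) (occ : PySem.Set Int),
      rest.all (vaCheck tl) = false → vbLoop tl occ rest = false := by
  intro rest
  induction rest with
  | nil => intro occ h; simp at h
  | cons ent rest ih =>
    intro occ h
    simp only [List.all_cons, Bool.and_eq_false_iff] at h
    by_cases hb : (ent.1 < 0 || ent.2.1 > (tl.length : Int) || ent.1 ≥ ent.2.1) = true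
    · simp [vbLoop, hb]
    · by_cases hs : PySem.Chars.strip (PySem.List.slice tl (some ent.1) (some ent.2.1)) = []
      · simp [vbLoop, hb, hs]
      · have hcheck : vaCheck tl ent = true := by simp [vaCheck, hb, hs]
        have hrest : rest.all (vaCheck tl) = false := by
          rcases h with h | h
          · rw [hcheck] at h; exact absurd h (by simp)
          · exact h
        simp only [vbLoop, hb, Bool.false_eq_true, if_false, if_neg hs]
        by_cases hc : PySem.Set.inter occ (PySem.Set.ofList (PySem.List.pyRange ent.1 ent.2.1 1)) ≠ []
        · rw [if_pos hc]
        · rw [if_neg hc]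
          exact ih _ hrest

-- characterisation of B's loop when every remaining entity passes the check
lemma vbLoop_char (tl : List Char) :
    ∀ (rest : List (Int × Int × String)) (occ : PySem.Set Int) (O : Int → Prop),
      (∀ x, x ∈ occ ↔ O x) →
      (∀ y ∈ rest, vaCheck tl y = true) →
      (vbLoop tl occ rest = true ↔
        (rest.Pairwise Disj ∧ ∀ y ∈ rest, ∀ x, O x → ¬(y.1 ≤ x ∧ x < y.2.1))) := by
  intro rest
  induction rest with
  | nil => intro occ O hocc hval; simp [vbLoop]
  | cons ent rest ih =>
    intro occ O hocc hval
    have hent : vaCheck tl ent = true := hval ent (by simp)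
    have hb : (ent.1 < 0 || ent.2.1 > (tl.length : Int) || ent.1 ≥ ent.2.1) = false := by
      by_contra hb
      simp only [Bool.not_eq_false] at hb
      simp [vaCheck, hb] at hent
    have hs : ¬ PySem.Chars.strip (PySem.List.slice tl (some ent.1) (some ent.2.1)) = [] := by
      intro hs
      simp [vaCheck, hb, hs] at hent
    have hse : ent.1 < ent.2.1 := by
      simp only [Bool.or_eq_false_iff, decide_eq_false_iff_not, not_le, not_lt] at hb
      omega
    simp only [vbLoop, hb, Bool.false_eq_true, if_false, if_neg hs]
    set span : PySem.Set Int := PySem.Set.ofList (PySem.List.pyRange ent.1 ent.2.1 1) with hspan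
    have hmem_span : ∀ x, x ∈ span ↔ ent.1 ≤ x ∧ x < ent.2.1 := by
      intro x
      rw [hspan, PySem.Set.mem_ofList, PySem.List.mem_pyRange_one]
    by_cases hcol : PySem.Set.inter occ span ≠ []
    · simp only [if_pos hcol, Bool.false_eq_true, false_iff]
      intro ⟨hpw, hfar⟩
      rcases List.exists_mem_of_ne_nil _ hcol with ⟨x, hx⟩
      rw [PySem.Set.mem_inter] at hx
      exact hfar ent (by simp) x ((hocc x).1 hx.1) ((hmem_span x).1 hx.2)
    · simp only [if_neg hcol]
      push Not at hcol
      have hnocol : ∀ x, O x → ¬(ent.1 ≤ x ∧ x < ent.2.1) := by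
        intro x hOx hx
        have : x ∈ PySem.Set.inter occ span := by
          rw [PySem.Set.mem_inter]; exact ⟨(hocc x).2 hOx, (hmem_span x).2 hx⟩
        rw [hcol] at this; exact absurd this (by simp)
      have ih' := ih (PySem.Set.union occ span) (fun x => O x ∨ (ent.1 ≤ x ∧ x < ent.2.1))
        (by intro x; rw [PySem.Set.mem_union, hocc, hmem_span])
        (by intro y hy; exact hval y (by simp [hy]))
      rw [ih']
      constructor
      · intro ⟨hpw, hfar⟩
        refine ⟨List.Pairwise.cons ?_ hpw, ?_⟩
        · intro y hy
          have hyv : y.1 < y.2.1 := by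
            have := hval y (by simp [hy])
            by_contra hge
            simp only [vaCheck] at this
            rw [if_pos (by simp; omega)] at this
            exact absurd this (by simp)
          have hdis := hfar y hy
          unfold Disj
          rw [← interval_disj hse hyv]
          intro x hx
          exact hdis x (Or.inr ⟨hx.1, hx.2.1⟩) ⟨hx.2.2.1, hx.2.2.2⟩
        · intro y hy x hOx
          rcases List.mem_cons.1 hy with rfl | hy'
          · exact hnocol x hOx
          · exact hfar y hy' x (Or.inl hOx)
      · intro ⟨hpw, hfar⟩
        rcases List.pairwise_cons.1 hpw with ⟨hhead, hrest⟩
        refine ⟨hrest, ?_⟩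
        intro y hy x hOx
        rcases hOx with hOx | hxin
        · exact hfar y (by simp [hy]) x hOx
        · have hyv : y.1 < y.2.1 := by
            have := hval y (by simp [hy])
            by_contra hge
            simp only [vaCheck] at this
            rw [if_pos (by simp; omega)] at this
            exact absurd this (by simp)
          have := hhead y hy
          unfold Disj at this
          rw [← interval_disj hse hyv] at this
          intro hx
          exact this x ⟨hxin.1, hxin.2, hx.1, hx.2⟩

-- A's adjacent-pair scan over the sorted list is exactly Chain' (end ≤ next start)
lemma adj_eq_chain (es : List (Int × Int × String)) :
    ((PySem.List.pyRange 0 ((es.length : Int) - 1) 1).all (vaAdj es) = true) ↔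
      es.IsChain (fun a b => a.2.1 ≤ b.1) := by
  rw [List.all_eq_true, List.isChain_iff_getElem]
  constructor
  · intro h i hi
    have hm : (i : Int) ∈ PySem.List.pyRange 0 ((es.length : Int) - 1) 1 := by
      rw [PySem.List.mem_pyRange_one]; omega
    have := h _ hm
    simp only [vaAdj] at this
    rw [PySem.List.pyGetD_eq_getElem (i := (i : Int)) es (0, 0, "") (by omega) (by omega),
        PySem.List.pyGetD_eq_getElem (i := (i : Int) + 1) es (0, 0, "") (by omega) (by omega)] at this
    simp only [Bool.not_eq_true', decide_eq_false_iff_not, not_lt] at this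
    simp only [← Nat.cast_add_one, Int.toNat_natCast] at this
    exact this
  · intro h i hm
    rw [PySem.List.mem_pyRange_one] at hm
    simp only [vaAdj]
    rw [PySem.List.pyGetD_eq_getElem (i := i) es (0, 0, "") (by omega) (by omega),
        PySem.List.pyGetD_eq_getElem (i := i + 1) es (0, 0, "") (by omega) (by omega)]
    simp only [Bool.not_eq_true', decide_eq_false_iff_not, not_lt]
    have hi1 : (i + 1).toNat = i.toNat + 1 := by omega
    simp only [hi1]
    exact h i.toNat (by omega)

-- on a start-sorted list of nonempty intervals, the adjacent condition is pairwise disjointness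
lemma chain_iff_pairwise (l : List (Int × Int × String))
    (hsort : l.Pairwise (fun a b => a.1 ≤ b.1))
    (hval : ∀ y ∈ l, y.1 < y.2.1) :
    l.IsChain (fun a b => a.2.1 ≤ b.1) ↔ l.Pairwise Disj := by
  induction l with
  | nil => simp
  | cons a t ih =>
    rcases List.pairwise_cons.1 hsort with ⟨ha, ht⟩
    have hval' : ∀ y ∈ t, y.1 < y.2.1 := fun y hy => hval y (by simp [hy])
    rw [List.isChain_cons, List.pairwise_cons, ih ht hval']
    constructor
    · intro ⟨hhead, hrest⟩
      refine ⟨?_, hrest⟩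
      intro y hy
      -- from the chain head and sortedness: a.end ≤ first start ≤ y.start
      cases t with
      | nil => simp at hy
      | cons b t' =>
        have hab : a.2.1 ≤ b.1 := hhead b rfl
        rcases List.mem_cons.1 hy with rfl | hy'
        · exact Or.inl hab
        · have hby : b.1 ≤ y.1 := (List.pairwise_cons.1 ht).1 y hy'
          exact Or.inl (by omega)
    · intro ⟨hhead, hrest⟩
      refine ⟨?_, hrest⟩
      intro b hb
      cases t with
      | nil => simp at hb
      | cons b' t' =>
        have hbb : b' = b := by simpa using hb
        subst hbb
        have hd := hhead b' (by simp)
        have hab : a.1 ≤ b'.1 := ha b' (by simp)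
        have hbv : b'.1 < b'.2.1 := hval' b' (by simp)
        unfold Disj at hd
        omega

-- Pairwise Disj transfers along the sorting permutation
lemma pairwise_sorted_iff (es : List (Int × Int × String)) :
    (PySem.List.sorted es (fun x => x.1) false).Pairwise Disj ↔ es.Pairwise Disj :=
  (PySem.List.sorted_perm es (fun x => x.1) false).pairwise_iff (by intro a b h; exact disj_symm h)

lemma vaCheck_lt {tl : List Char} {y : Int × Int × String} (h : vaCheck tl y = true) :
    y.1 < y.2.1 := by
  by_contra hge
  simp only [vaCheck] at h
  rw [if_pos (by simp; omega)] at h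
  exact absurd h (by simp)

-- the main equality
lemma main_eq (text : String) (entities : List (Int × Int × String)) :
    validate_entities text entities = validate_entities_alt text entities := by
  by_cases hnil : entities = []
  · subst hnil; rfl
  · by_cases hall : entities.all (vaCheck text.toList) = true
    · -- every entity passes the alignment check
      have hval : ∀ y ∈ entities, vaCheck text.toList y = true := List.all_eq_true.1 hall
      have hvalidB := vbLoop_char text.toList entities PySem.Set.empty (fun _ => False)
        (by intro x; simp [PySem.Set.empty]) hval
      have hB : validate_entities_alt text entities = true ↔ entities.Pairwise Disj := by
        unfold validate_entities_alt
        rw [hvalidB]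
        simp
      set srt := PySem.List.sorted entities (fun x => x.1) false with hsrt
      have hvalS : ∀ y ∈ srt, y.1 < y.2.1 := by
        intro y hy
        rw [hsrt, PySem.List.mem_sorted] at hy
        exact vaCheck_lt (hval y hy)
      have hsortP : srt.Pairwise (fun a b => a.1 ≤ b.1) :=
        PySem.List.sorted_pairwise entities (fun x => x.1)
      have hA : validate_entities text entities = true ↔ entities.Pairwise Disj := by
        unfold validate_entities
        rw [if_neg hnil, hall]
        simp only [Bool.not_true, Bool.false_eq_true, if_false]
        constructor
        · intro h
          split at h
          · exact absurd h (by simp)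
          · rename_i hadj
            rw [Bool.not_eq_true', Bool.not_eq_false] at hadj
            rw [← pairwise_sorted_iff, ← chain_iff_pairwise srt hsortP hvalS, ← adj_eq_chain]
            exact hadj
        · intro h
          rw [← pairwise_sorted_iff, ← chain_iff_pairwise srt hsortP hvalS, ← adj_eq_chain] at h
          rw [h]
          simp
      rw [Bool.eq_iff_iff, hA, hB]
    · -- some entity fails the alignment check: both sides are false
      rw [Bool.not_eq_true] at hall
      have hA : validate_entities text entities = false := by
        unfold validate_entities
        rw [if_neg hnil, hall]
        simp
      have hB : validate_entities_alt text entities = false :=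
        vbLoop_false_of_bad text.toList entities PySem.Set.empty hall
      rw [hA, hB]

-- ===== VERDICT (by name: the statement is the Claim_ definition above) =====
theorem validate_entities_spec : Claim_equal_validate_entities := by
  intro text entities _
  exact main_eq text entities
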